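-- pv_equiv track=rewrite | github.com/martina-cormand/padel-quadres-app | utils/group_generator.py | has_slot_matching
-- ===== SOURCE A (Python) =====
-- def has_slot_matching(critical_matches):
--    slot_to_match = {}
--
--    def can_assign(match_idx, used_slots, assignments):
--       if match_idx >= len(critical_matches):
--          return True
--       _, slots = critical_matches[match_idx]
--       for slot in slots:
--          if slot in used_slots:
--             continue
--          used_slots.add(slot)
--          assignments.append((critical_matches[match_idx][0], slot))
--          if can_assign(match_idx + 1, used_slots, assignments):
--             return True
--          used_slots.remove(slot)
--          assignments.pop()
--       return False
--
--    return can_assign(0, set(), [])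
-- ===== SOURCE B (Python) =====
-- def has_slot_matching(critical_matches):
--     # Kuhn's augmenting-path bipartite matching: match i -> slot, check all matches saturated.
--     match_slot = {}   # match index -> slot
--     slot_match = {}   # slot -> match index
--
--     def try_assign(i, visited):
--         for slot in critical_matches[i][1]:
--             if slot in visited:
--                 continue
--             visited.add(slot)
--             owner = slot_match.get(slot)
--             if owner is None:
--                 match_slot[i] = slot
--                 slot_match[slot] = i
--                 return True
--             # temporarily free the slot and try to re-seat its current owner
--             del slot_match[slot]
--             del match_slot[owner]
--             if try_assign(owner, visited):
--                 match_slot[i] = slot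
--                 slot_match[slot] = i
--                 return True
--             slot_match[slot] = owner
--             match_slot[owner] = slot
--         return False
--
--     return all(try_assign(i, set()) for i in range(len(critical_matches)))
-- ===== Notes on version B (the rewrite author's own statement) =====
-- stated objective: alternative
-- what changed: Replaces A's backtracking search over all slot assignments by Kuhn's augmenting-path bipartite matching (match index -> slot plus the inverse slot -> match map), checking that every match gets saturated; a timing run measured no speed-up on its generated inputs, so no speed is claimed.
import Mathlib
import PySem

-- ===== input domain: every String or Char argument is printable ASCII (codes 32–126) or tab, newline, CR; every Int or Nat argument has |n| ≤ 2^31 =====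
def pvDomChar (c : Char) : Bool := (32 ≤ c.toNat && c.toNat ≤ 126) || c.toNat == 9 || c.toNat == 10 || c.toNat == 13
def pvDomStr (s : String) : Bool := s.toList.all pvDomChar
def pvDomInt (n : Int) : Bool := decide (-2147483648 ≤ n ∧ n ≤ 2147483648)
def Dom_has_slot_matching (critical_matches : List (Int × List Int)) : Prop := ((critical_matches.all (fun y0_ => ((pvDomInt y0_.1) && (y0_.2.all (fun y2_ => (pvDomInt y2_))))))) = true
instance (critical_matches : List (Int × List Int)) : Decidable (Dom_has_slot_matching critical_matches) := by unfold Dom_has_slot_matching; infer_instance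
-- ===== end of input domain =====

-- B replaces A's backtracking search over slot assignments by Kuhn's augmenting-path
-- bipartite matching; both return whether every match can get a distinct slot.

-- ===== PORT A =====
-- A recurses over the remaining matches (can_assign) with an inner loop over the current match's
-- slots; the used-slot set and the assignments list are threaded functionally (passing the
-- un-extended set/list to the next loop iteration is exactly A's remove/pop backtracking).
-- A's local `slot_to_match = {}` is dead (never read or written) and is dropped.
mutual
def pvCanAssign (rest : List (Int × List Int)) (used : PySem.Set Int)
    (assignments : List (Int × Int)) : Bool :=
  match rest with
  | [] => true
  | (mid, slots) :: r => pvTrySlots slots mid r used assignments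
termination_by (rest.length, 0)

def pvTrySlots (slots : List Int) (mid : Int) (r : List (Int × List Int))
    (used : PySem.Set Int) (assignments : List (Int × Int)) : Bool :=
  match slots with
  | [] => false
  | s :: ss =>
    if used.contains s then pvTrySlots ss mid r used assignments
    else if pvCanAssign r (used.add s) (assignments ++ [(mid, s)]) then true
    else pvTrySlots ss mid r used assignments
termination_by (r.length, slots.length + 1)
end

def has_slot_matching (critical_matches : List (Int × List Int)) : Bool :=
  pvCanAssign critical_matches PySem.Set.empty []

-- ===== PORT B =====
-- Kuhn's algorithm: for each match index try to find an augmenting path (pvTryAssign); the two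
-- dicts are the matching and its inverse; `visited` only ever grows. The list indexings
-- critical_matches[i][1] are always in range (i comes from range(len) or is a stored owner),
-- ported with getD. Python needs no fuel; the Lean recursion takes fuel > the recursion
-- depth (bounded by the number of slots, since each recursive call first visits a new slot).
def pvSlots (cm : List (Int × List Int)) (i : Nat) : List Int := (cm.getD i (0, [])).2

def pvFuel (cm : List (Int × List Int)) : Nat := (cm.flatMap (fun p => p.2)).length + 1

mutual
def pvTryAssign (cm : List (Int × List Int)) (fuel : Nat) (i : Nat)
    (mS : PySem.Dict Nat Int) (sM : PySem.Dict Int Nat) (vis : PySem.Set Int) :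
    Bool × PySem.Dict Nat Int × PySem.Dict Int Nat × PySem.Set Int :=
  match fuel with
  | 0 => (false, mS, sM, vis)  -- never reached with pvFuel (see pvFuel comment)
  | fuel + 1 => pvTryLoop cm fuel i (pvSlots cm i) mS sM vis
termination_by (fuel, 0)

def pvTryLoop (cm : List (Int × List Int)) (fuel : Nat) (i : Nat) (slots : List Int)
    (mS : PySem.Dict Nat Int) (sM : PySem.Dict Int Nat) (vis : PySem.Set Int) :
    Bool × PySem.Dict Nat Int × PySem.Dict Int Nat × PySem.Set Int :=
  match slots with
  | [] => (false, mS, sM, vis)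
  | s :: rest =>
    if vis.contains s then pvTryLoop cm fuel i rest mS sM vis
    else
      let vis' := vis.add s
      match sM.get? s with
      | none => (true, mS.insert i s, sM.insert s i, vis')
      | some owner =>
        -- temporarily free the slot, try to re-seat its owner
        match pvTryAssign cm fuel owner (mS.erase owner) (sM.erase s) vis' with
        | (true, mS2, sM2, vis2) => (true, mS2.insert i s, sM2.insert s i, vis2)
        | (false, mS2, sM2, vis2) =>
          pvTryLoop cm fuel i rest (mS2.insert owner s) (sM2.insert s owner) vis2
termination_by (fuel, slots.length + 1)
end

def pvAllLoop (cm : List (Int × List Int)) (idxs : List Nat)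
    (mS : PySem.Dict Nat Int) (sM : PySem.Dict Int Nat) : Bool :=
  match idxs with
  | [] => true
  | i :: rest =>
    match pvTryAssign cm (pvFuel cm) i mS sM PySem.Set.empty with
    | (true, mS', sM', _) => pvAllLoop cm rest mS' sM'
    | (false, _, _, _) => false

def has_slot_matching_alt (critical_matches : List (Int × List Int)) : Bool :=
  pvAllLoop critical_matches (List.range critical_matches.length) PySem.Dict.empty PySem.Dict.empty

-- ===== PRECONDITION & SPEC =====
def Spec_has_slot_matching (critical_matches : List (Int × List Int)) (out : Bool) : Prop := out = has_slot_matching_alt critical_matches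
instance (critical_matches : List (Int × List Int)) (out : Bool) : Decidable (Spec_has_slot_matching critical_matches out) := by unfold Spec_has_slot_matching; infer_instance

-- ===== CLAIM (what is proved, stated in full; the proofs are below) =====
def Claim_equal_has_slot_matching : Prop := ∀ (critical_matches : List (Int × List Int)), Dom_has_slot_matching critical_matches → Spec_has_slot_matching critical_matches (has_slot_matching critical_matches)

-- ===== LEMMAS AND PROOFS =====

-- both sides are characterised by the existence of a system of distinct representatives (Chooser)

/-- a system of distinct representatives: an injective choice of a slot for every match. -/
def pvChooser (cm : List (Int × List Int)) (g : Nat → Int) : Prop :=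
  (∀ k, k < cm.length → g k ∈ pvSlots cm k) ∧
  (∀ k1 k2, k1 < cm.length → k2 < cm.length → g k1 = g k2 → k1 = k2)

/-- what A's backtracking decides, as a structural predicate. -/
def pvSDR : List (Int × List Int) → List Int → Prop
  | [], _ => True
  | (_, slots) :: r, used => ∃ s, s ∈ slots ∧ s ∉ used ∧ pvSDR r (s :: used)

/-- the matching invariant of B: the two dicts are inverse, and respect adjacency/bounds. -/
def pvInv (cm : List (Int × List Int)) (mS : PySem.Dict Nat Int) (sM : PySem.Dict Int Nat) : Prop :=
  (∀ j s, mS.get? j = some s ↔ sM.get? s = some j) ∧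
  (∀ j s, mS.get? j = some s → j < cm.length ∧ s ∈ pvSlots cm j)

theorem pv_get?_erase {κ ν : Type} [BEq κ] [LawfulBEq κ] [DecidableEq κ] (d : PySem.Dict κ ν) (k k' : κ) :
    (d.erase k).get? k' = if k' = k then none else d.get? k' := by
  rcases d with ⟨items⟩
  simp only [PySem.Dict.erase, PySem.Dict.get?]
  induction items with
  | nil => simp
  | cons p rest ih =>
    rw [List.filter_cons]
    by_cases hpk : p.1 = k
    · have hb : (!p.1 == k) = false := by simp [hpk]
      rw [hb, if_neg (by simp), ih]
      by_cases hk : k' = k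
      · simp [hk]
      · have hpk' : (p.1 == k') = false := by
          simp only [beq_eq_false_iff_ne, Ne]
          exact fun h => hk ((h ▸ hpk : k' = k))
        rw [if_neg hk, if_neg hk, List.find?_cons_of_neg (by simp [hpk'])]
    · have hb : (!p.1 == k) = true := by simp [hpk]
      rw [hb, if_pos rfl]
      by_cases hpky : p.1 = k'
      · have hk : ¬ k' = k := fun h => hpk (hpky.trans h)
        rw [List.find?_cons_of_pos (by simp [hpky]), List.find?_cons_of_pos (by simp [hpky]),
          if_neg hk]
      · rw [List.find?_cons_of_neg (by simp [hpky]), List.find?_cons_of_neg (by simp [hpky]), ih]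

theorem pvSDR_congr (l : List (Int × List Int)) : ∀ u1 u2 : List Int,
    (∀ x, x ∈ u1 ↔ x ∈ u2) → (pvSDR l u1 ↔ pvSDR l u2) := by
  induction l with
  | nil => intro u1 u2 _; simp [pvSDR]
  | cons p r ih =>
    intro u1 u2 h
    obtain ⟨mid, slots⟩ := p
    simp only [pvSDR]
    constructor
    all_goals
      rintro ⟨s, hs, hnu, hrec⟩
      refine ⟨s, hs, by simp [h s] at hnu ⊢; exact hnu, ?_⟩
    · exact (ih (s :: u1) (s :: u2) (by intro x; simp [h x])).mp hrec
    · exact (ih (s :: u1) (s :: u2) (by intro x; simp [h x])).mpr hrec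

theorem pvTrySlots_iff (mid : Int) (r : List (Int × List Int)) :
    ∀ (slots : List Int) (used : PySem.Set Int) (asg : List (Int × Int)),
    pvTrySlots slots mid r used asg = true ↔
      ∃ s ∈ slots, s ∉ used ∧
        pvCanAssign r (used.add s) (asg ++ [(mid, s)]) = true := by
  intro slots
  induction slots with
  | nil => intro used asg; simp [pvTrySlots]
  | cons s ss ih =>
    intro used asg
    rw [pvTrySlots]
    by_cases hc : s ∈ used
    · rw [if_pos ((PySem.Set.contains_iff used s).mpr hc), ih]
      constructor
      · rintro ⟨t, ht, h1, h2⟩; exact ⟨t, List.mem_cons_of_mem _ ht, h1, h2⟩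
      · rintro ⟨t, ht, h1, h2⟩
        rcases List.mem_cons.mp ht with rfl | ht
        · exact absurd hc h1
        · exact ⟨t, ht, h1, h2⟩
    · rw [if_neg (fun hcc => hc ((PySem.Set.contains_iff used s).mp hcc))]
      by_cases hr : pvCanAssign r (used.add s) (asg ++ [(mid, s)]) = true
      · simp only [hr, if_true, true_iff]
        exact ⟨s, List.mem_cons_self, hc, hr⟩
      · rw [if_neg hr, ih]
        constructor
        · rintro ⟨t, ht, h1, h2⟩; exact ⟨t, List.mem_cons_of_mem _ ht, h1, h2⟩
        · rintro ⟨t, ht, h1, h2⟩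
          rcases List.mem_cons.mp ht with rfl | ht
          · exact absurd h2 hr
          · exact ⟨t, ht, h1, h2⟩

theorem pvCanAssign_iff : ∀ (l : List (Int × List Int)) (used : PySem.Set Int)
    (asg : List (Int × Int)), pvCanAssign l used asg = true ↔ pvSDR l used := by
  intro l
  induction l with
  | nil => intro used asg; simp [pvCanAssign, pvSDR]
  | cons p r ih =>
    intro used asg
    obtain ⟨mid, slots⟩ := p
    rw [pvCanAssign, pvTrySlots_iff]
    simp only [pvSDR]
    constructor
    · rintro ⟨s, hs, hc, hrec⟩
      refine ⟨s, hs, hc, ?_⟩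
      exact (pvSDR_congr r (used.add s) (s :: used)
        (by intro x; simp [PySem.Set.mem_add, or_comm])).mp ((ih _ _).mp hrec)
    · rintro ⟨s, hs, hnu, hrec⟩
      refine ⟨s, hs, hnu, ?_⟩
      exact (ih _ _).mpr ((pvSDR_congr r (s :: used) (used.add s)
        (by intro x; simp [PySem.Set.mem_add, or_comm])).mp hrec)

theorem pvA_char (cm : List (Int × List Int)) :
    has_slot_matching cm = true ↔ pvSDR cm [] := by
  unfold has_slot_matching
  exact pvCanAssign_iff cm PySem.Set.empty []

theorem pvSDR_to_fun : ∀ (l : List (Int × List Int)) (used : List Int), pvSDR l used →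
    ∃ g : Nat → Int,
      (∀ k, k < l.length → g k ∈ pvSlots l k ∧ g k ∉ used) ∧
      (∀ k1 k2, k1 < l.length → k2 < l.length → g k1 = g k2 → k1 = k2) := by
  intro l
  induction l with
  | nil => intro used _; exact ⟨fun _ => 0, by simp, by simp⟩
  | cons p r ih =>
    intro used h
    obtain ⟨mid, slots⟩ := p
    obtain ⟨s, hs, hnu, hrec⟩ := h
    obtain ⟨g', hg', hinj'⟩ := ih (s :: used) hrec
    refine ⟨fun k => match k with | 0 => s | k + 1 => g' k, ?_, ?_⟩
    · intro k hk
      match k with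
      | 0 => exact ⟨by simpa [pvSlots] using hs, hnu⟩
      | k + 1 =>
        have := hg' k (by simpa using hk)
        refine ⟨by simpa [pvSlots, List.getD_cons_succ] using this.1, ?_⟩
        intro hmem; exact this.2 (List.mem_cons_of_mem _ hmem)
    · intro k1 k2 h1 h2 heq
      match k1, k2 with
      | 0, 0 => rfl
      | 0, k2 + 1 =>
        exfalso
        have heq' : s = g' k2 := heq
        exact (hg' k2 (by simpa using h2)).2 (heq' ▸ List.mem_cons_self)
      | k1 + 1, 0 =>
        exfalso
        have heq' : g' k1 = s := heq
        exact (hg' k1 (by simpa using h1)).2 (heq' ▸ List.mem_cons_self)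
      | k1 + 1, k2 + 1 =>
        simpa using hinj' k1 k2 (by simpa using h1) (by simpa using h2) heq

theorem pvFun_to_SDR : ∀ (l : List (Int × List Int)) (used : List Int) (g : Nat → Int),
    (∀ k, k < l.length → g k ∈ pvSlots l k ∧ g k ∉ used) →
    (∀ k1 k2, k1 < l.length → k2 < l.length → g k1 = g k2 → k1 = k2) →
    pvSDR l used := by
  intro l
  induction l with
  | nil => intro used g _ _; trivial
  | cons p r ih =>
    intro used g hg hinj
    obtain ⟨mid, slots⟩ := p
    have h0 := hg 0 (by simp)
    refine ⟨g 0, by simpa [pvSlots] using h0.1, h0.2, ?_⟩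
    apply ih (g 0 :: used) (fun k => g (k + 1))
    · intro k hk
      have := hg (k + 1) (by simpa using hk)
      refine ⟨by simpa [pvSlots, List.getD_cons_succ] using this.1, ?_⟩
      intro hmem
      rcases List.mem_cons.mp hmem with heq | hmem'
      · exact Nat.succ_ne_zero k (hinj (k + 1) 0 (by simpa using hk) (by simp) heq)
      · exact this.2 hmem'
    · intro k1 k2 h1 h2 heq
      simpa using hinj (k1 + 1) (k2 + 1) (by simpa using h1) (by simpa using h2) heq

theorem pvSDR_iff_chooser (cm : List (Int × List Int)) :
    pvSDR cm [] ↔ ∃ g, pvChooser cm g := by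
  constructor
  · intro h
    obtain ⟨g, hg, hinj⟩ := pvSDR_to_fun cm [] h
    exact ⟨g, fun k hk => (hg k hk).1, hinj⟩
  · rintro ⟨g, hg, hinj⟩
    exact pvFun_to_SDR cm [] g (fun k hk => ⟨hg k hk, by simp⟩) hinj

-- ---- B side: Kuhn's algorithm finds a matching saturating all matches iff a chooser exists ----

def pvVisF (v : PySem.Set Int) : Finset Int := v.toFinset

def pvU (cm : List (Int × List Int)) : Finset Int := (cm.flatMap (fun p => p.2)).toFinset

/-- closure of a failed augmenting search: every newly visited slot is matched,
to a match all of whose slots were visited. -/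
def pvClosure (cm : List (Int × List Int)) (vis : PySem.Set Int) (sM : PySem.Dict Int Nat)
    (vis' : PySem.Set Int) : Prop :=
  ∀ t, t ∈ vis' → t ∉ vis → ∃ j, sM.get? t = some j ∧ j < cm.length ∧
    ∀ u ∈ pvSlots cm j, u ∈ vis'

def PvAT (fuel : Nat) : Prop := ∀ (cm : List (Int × List Int)) (i : Nat) mS sM vis mS' sM' vis',
  pvTryAssign cm fuel i mS sM vis = (true, mS', sM', vis') →
  pvInv cm mS sM → i < cm.length → mS.get? i = none →
  (pvU cm \ pvVisF vis).card < fuel →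
  pvInv cm mS' sM' ∧
  (∀ j, (mS'.get? j).isSome = true ↔ (j = i ∨ (mS.get? j).isSome = true)) ∧
  (∀ t, t ∈ vis → sM'.get? t = sM.get? t)

def PvAF (fuel : Nat) : Prop := ∀ (cm : List (Int × List Int)) (i : Nat) mS sM vis mS' sM' vis',
  pvTryAssign cm fuel i mS sM vis = (false, mS', sM', vis') →
  pvInv cm mS sM → i < cm.length →
  (pvU cm \ pvVisF vis).card < fuel →
  (∀ k, mS'.get? k = mS.get? k) ∧ (∀ t, sM'.get? t = sM.get? t) ∧
  (∀ t, t ∈ vis → t ∈ vis') ∧ (∀ u ∈ pvSlots cm i, u ∈ vis') ∧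
  pvClosure cm vis sM vis'

def PvLT (fuel : Nat) : Prop := ∀ (cm : List (Int × List Int)) (i : Nat) (slots : List Int)
    mS sM vis mS' sM' vis',
  pvTryLoop cm fuel i slots mS sM vis = (true, mS', sM', vis') →
  pvInv cm mS sM → i < cm.length → mS.get? i = none →
  (∀ s ∈ slots, s ∈ pvSlots cm i) →
  (pvU cm \ pvVisF vis).card ≤ fuel →
  pvInv cm mS' sM' ∧
  (∀ j, (mS'.get? j).isSome = true ↔ (j = i ∨ (mS.get? j).isSome = true)) ∧
  (∀ t, t ∈ vis → sM'.get? t = sM.get? t)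

def PvLF (fuel : Nat) : Prop := ∀ (cm : List (Int × List Int)) (i : Nat) (slots : List Int)
    mS sM vis mS' sM' vis',
  pvTryLoop cm fuel i slots mS sM vis = (false, mS', sM', vis') →
  pvInv cm mS sM → i < cm.length →
  (∀ s ∈ slots, s ∈ pvSlots cm i) →
  (pvU cm \ pvVisF vis).card ≤ fuel →
  (∀ k, mS'.get? k = mS.get? k) ∧ (∀ t, sM'.get? t = sM.get? t) ∧
  (∀ t, t ∈ vis → t ∈ vis') ∧ (∀ u ∈ slots, u ∈ vis') ∧
  pvClosure cm vis sM vis'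

theorem pvInv_congr (cm : List (Int × List Int)) (m1 m2 : PySem.Dict Nat Int)
    (s1 s2 : PySem.Dict Int Nat) (hm : ∀ k, m1.get? k = m2.get? k)
    (hs : ∀ t, s1.get? t = s2.get? t) (h : pvInv cm m2 s2) : pvInv cm m1 s1 := by
  obtain ⟨h1, h2⟩ := h
  exact ⟨fun j s => by rw [hm, hs]; exact h1 j s, fun j s hj => h2 j s (by rw [← hm]; exact hj)⟩

theorem pvInv_erase_pair (cm : List (Int × List Int)) (mS : PySem.Dict Nat Int)
    (sM : PySem.Dict Int Nat) (ow : Nat) (s : Int) (h : pvInv cm mS sM)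
    (how : mS.get? ow = some s) : pvInv cm (mS.erase ow) (sM.erase s) := by
  obtain ⟨h1, h2⟩ := h
  constructor
  · intro j t
    rw [pv_get?_erase, pv_get?_erase]
    by_cases hj : j = ow
    · rw [if_pos hj]
      by_cases ht : t = s
      · rw [if_pos ht]; simp
      · rw [if_neg ht]
        apply iff_of_false (by simp)
        intro hc
        rw [hj] at hc
        have h3 := (h1 ow t).mpr hc
        rw [how] at h3
        exact ht (Option.some_inj.mp h3).symm
    · rw [if_neg hj]
      by_cases ht : t = s
      · rw [if_pos ht]
        apply iff_of_false _ (by simp)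
        intro hc
        rw [ht] at hc
        have h4 := (h1 j s).mp hc
        have h5 := (h1 ow s).mp how
        exact hj (Option.some_inj.mp (h4.symm.trans h5))
      · rw [if_neg ht]; exact h1 j t
  · intro j t hj
    rw [pv_get?_erase] at hj
    split_ifs at hj
    exact h2 j t hj

theorem pvInv_insert_pair (cm : List (Int × List Int)) (mS : PySem.Dict Nat Int)
    (sM : PySem.Dict Int Nat) (i : Nat) (s : Int) (h : pvInv cm mS sM)
    (hi : mS.get? i = none) (hs : sM.get? s = none) (hlen : i < cm.length)
    (hadj : s ∈ pvSlots cm i) : pvInv cm (mS.insert i s) (sM.insert s i) := by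
  obtain ⟨h1, h2⟩ := h
  constructor
  · intro j t
    rw [PySem.Dict.get?_insert, PySem.Dict.get?_insert]
    by_cases hj : j = i <;> by_cases ht : t = s
    · rw [if_pos hj, if_pos ht, hj, ht]; simp
    · rw [if_pos hj, if_neg ht]
      apply iff_of_false
      · intro hc; exact ht (Option.some_inj.mp hc).symm
      · intro hc
        have := (h1 j t).mpr (by rw [hj] at hc ⊢; exact hc)
        rw [hj, hi] at this; exact absurd this (by simp)
    · rw [if_neg hj, if_pos ht]
      apply iff_of_false
      · intro hc
        have := (h1 j t).mp hc
        rw [ht, hs] at this; exact absurd this (by simp)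
      · intro hc; exact hj (Option.some_inj.mp hc).symm
    · rw [if_neg hj, if_neg ht]; exact h1 j t
  · intro j t hj
    rw [PySem.Dict.get?_insert] at hj
    split_ifs at hj with h'
    · exact ⟨h' ▸ hlen, (Option.some_inj.mp hj) ▸ (h' ▸ hadj)⟩
    · exact h2 j t hj

theorem pv_slots_subset_U (cm : List (Int × List Int)) (i : Nat) (hi : i < cm.length) :
    ∀ s ∈ pvSlots cm i, s ∈ pvU cm := by
  intro s hs
  unfold pvU
  rw [List.mem_toFinset, List.mem_flatMap]
  refine ⟨cm[i], List.getElem_mem hi, ?_⟩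
  unfold pvSlots at hs
  rwa [List.getD_eq_getElem?_getD, List.getElem?_eq_getElem hi] at hs

theorem pv_visF_add (vis : PySem.Set Int) (s : Int) :
    pvVisF (vis.add s) = insert s (pvVisF vis) := by
  unfold pvVisF
  ext x
  simp [PySem.Set.mem_add, or_comm]

theorem pv_card_lt (cm : List (Int × List Int)) (vis : PySem.Set Int) (s : Int)
    (hU : s ∈ pvU cm) (hvis : s ∉ vis) :
    (pvU cm \ pvVisF (vis.add s)).card < (pvU cm \ pvVisF vis).card := by
  apply Finset.card_lt_card
  rw [pv_visF_add]
  constructor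
  · intro x hx
    rw [Finset.mem_sdiff] at hx ⊢
    exact ⟨hx.1, fun hm => hx.2 (Finset.mem_insert_of_mem hm)⟩
  · intro hsub
    have hs : s ∈ pvU cm \ pvVisF vis := by
      rw [Finset.mem_sdiff]
      exact ⟨hU, by simpa [pvVisF, List.mem_toFinset] using hvis⟩
    have := hsub hs
    rw [Finset.mem_sdiff] at this
    exact this.2 (Finset.mem_insert_self s _)

theorem pv_card_mono (cm : List (Int × List Int)) (v1 v2 : PySem.Set Int)
    (h : ∀ t, t ∈ v1 → t ∈ v2) :
    (pvU cm \ pvVisF v2).card ≤ (pvU cm \ pvVisF v1).card := by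
  apply Finset.card_le_card
  intro x hx
  rw [Finset.mem_sdiff] at hx ⊢
  refine ⟨hx.1, fun hm => hx.2 ?_⟩
  simp only [pvVisF, List.mem_toFinset] at hm ⊢
  exact h x hm

theorem pvLF_main (fuel : Nat) (ihF : PvAF fuel) : PvLF fuel := by
  intro cm i slots
  induction slots with
  | nil =>
    intro mS sM vis mS' sM' vis' h hInv hlen hsub hfuel
    rw [pvTryLoop] at h
    simp only [Prod.mk.injEq] at h
    obtain ⟨-, hB, hC, hD⟩ := h
    subst hB; subst hC; subst hD
    exact ⟨fun _ => rfl, fun _ => rfl, fun t ht => ht, by simp,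
      fun t ht htn => absurd ht htn⟩
  | cons s rest ih =>
    intro mS sM vis mS' sM' vis' h hInv hlen hsub hfuel
    rw [pvTryLoop] at h
    by_cases hc : s ∈ vis
    · rw [if_pos ((PySem.Set.contains_iff vis s).mpr hc)] at h
      obtain ⟨hm3, hs3, hv3, hslots3, hclo3⟩ :=
        ih mS sM vis mS' sM' vis' h hInv hlen (fun u hu => hsub u (List.mem_cons_of_mem _ hu)) hfuel
      exact ⟨hm3, hs3, hv3, fun u hu => by
        rcases List.mem_cons.mp hu with rfl | hu
        · exact hv3 u hc
        · exact hslots3 u hu, hclo3⟩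
    · rw [if_neg (fun hcc => hc ((PySem.Set.contains_iff vis s).mp hcc))] at h
      cases hss : sM.get? s with
      | none => rw [hss] at h; simp at h
      | some owner =>
        rw [hss] at h
        dsimp only at h
        rcases hrec : pvTryAssign cm fuel owner (mS.erase owner) (sM.erase s) (vis.add s) with
          ⟨b, mS2, sM2, vis2⟩
        rw [hrec] at h
        cases b with
        | true => simp at h
        | false =>
          -- facts about the failing recursive search
          have howner : mS.get? owner = some s := (hInv.1 owner s).mpr hss
          have hownerlen : owner < cm.length := (hInv.2 owner s howner).1
          have hsU : s ∈ pvU cm := pv_slots_subset_U cm i hlen s (hsub s List.mem_cons_self)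
          have hInv2 : pvInv cm (mS.erase owner) (sM.erase s) :=
            pvInv_erase_pair cm mS sM owner s hInv howner
          have hfuel2 : (pvU cm \ pvVisF (vis.add s)).card < fuel :=
            lt_of_lt_of_le (pv_card_lt cm vis s hsU hc) hfuel
          obtain ⟨hm2, hs2, hv2, hslots2, hclo2⟩ :=
            ihF cm owner (mS.erase owner) (sM.erase s) (vis.add s) mS2 sM2 vis2 hrec hInv2
              hownerlen hfuel2
          -- the restored dicts agree with the originals on every lookup
          have hmr : ∀ k, (mS2.insert owner s).get? k = mS.get? k := by
            intro k
            rw [PySem.Dict.get?_insert]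
            by_cases hk : k = owner
            · rw [if_pos hk, hk, howner]
            · rw [if_neg hk, hm2 k, pv_get?_erase, if_neg hk]
          have hsr : ∀ t, (sM2.insert s owner).get? t = sM.get? t := by
            intro t
            rw [PySem.Dict.get?_insert]
            by_cases ht : t = s
            · rw [if_pos ht, ht, hss]
            · rw [if_neg ht, hs2 t, pv_get?_erase, if_neg ht]
          have hInvr : pvInv cm (mS2.insert owner s) (sM2.insert s owner) :=
            pvInv_congr cm _ mS _ sM hmr hsr hInv
          have hvv2 : ∀ t, t ∈ vis → t ∈ vis2 :=
            fun t ht => hv2 t ((PySem.Set.mem_add vis s t).mpr (Or.inl ht))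
          obtain ⟨hm3, hs3, hv3, hslots3, hclo3⟩ :=
            ih (mS2.insert owner s) (sM2.insert s owner) vis2 mS' sM' vis' h hInvr hlen
              (fun u hu => hsub u (List.mem_cons_of_mem _ hu))
              (le_trans (pv_card_mono cm vis vis2 hvv2) hfuel)
          refine ⟨fun k => (hm3 k).trans (hmr k), fun t => (hs3 t).trans (hsr t),
            fun t ht => hv3 t (hvv2 t ht), ?_, ?_⟩
          · intro u hu
            rcases List.mem_cons.mp hu with rfl | hu
            · exact hv3 _ (hv2 _ ((PySem.Set.mem_add _ _ _).mpr (Or.inr rfl)))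
            · exact hslots3 u hu
          · intro t htv' htnv
            by_cases ht2 : t ∈ vis2
            · by_cases hts : t = s
              · subst hts
                exact ⟨owner, hss, hownerlen, fun u hu => hv3 u (hslots2 u hu)⟩
              · have htna : t ∉ vis.add s := by
                  rw [PySem.Set.mem_add vis s t]; rintro (h' | h') <;> [exact htnv h'; exact hts h']
                obtain ⟨j, hjt, hjlen, hjslots⟩ := hclo2 t ht2 htna
                rw [pv_get?_erase, if_neg hts] at hjt
                exact ⟨j, hjt, hjlen, fun u hu => hv3 u (hjslots u hu)⟩
            · obtain ⟨j, hjt, hjlen, hjslots⟩ := hclo3 t htv' ht2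
              rw [hsr t] at hjt
              exact ⟨j, hjt, hjlen, hjslots⟩
theorem pvLT_main (fuel : Nat) (ihT : PvAT fuel) (ihF : PvAF fuel) : PvLT fuel := by
  intro cm i slots
  induction slots with
  | nil =>
    intro mS sM vis mS' sM' vis' h
    rw [pvTryLoop] at h
    simp at h
  | cons s rest ih =>
    intro mS sM vis mS' sM' vis' h hInv hlen hnone hsub hfuel
    rw [pvTryLoop] at h
    by_cases hc : s ∈ vis
    · rw [if_pos ((PySem.Set.contains_iff vis s).mpr hc)] at h
      exact ih mS sM vis mS' sM' vis' h hInv hlen hnone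
        (fun u hu => hsub u (List.mem_cons_of_mem _ hu)) hfuel
    · rw [if_neg (fun hcc => hc ((PySem.Set.contains_iff vis s).mp hcc))] at h
      have hadj : s ∈ pvSlots cm i := hsub s List.mem_cons_self
      have hsU : s ∈ pvU cm := pv_slots_subset_U cm i hlen s hadj
      cases hss : sM.get? s with
      | none =>
        rw [hss] at h
        dsimp only at h
        simp only [Prod.mk.injEq] at h
        obtain ⟨-, hB, hC, hD⟩ := h
        subst hB; subst hC; subst hD
        refine ⟨pvInv_insert_pair cm mS sM i s hInv hnone hss hlen hadj, ?_, ?_⟩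
        · intro j
          rw [PySem.Dict.get?_insert]
          by_cases hj : j = i
          · rw [if_pos hj]; simp [hj]
          · rw [if_neg hj]; simp [hj]
        · intro t ht
          rw [PySem.Dict.get?_insert, if_neg (fun h' : t = s => hc (h' ▸ ht))]
      | some owner =>
        rw [hss] at h
        dsimp only at h
        rcases hrec : pvTryAssign cm fuel owner (mS.erase owner) (sM.erase s) (vis.add s) with
          ⟨b, mS2, sM2, vis2⟩
        rw [hrec] at h
        have howner : mS.get? owner = some s := (hInv.1 owner s).mpr hss
        have hownerlen : owner < cm.length := (hInv.2 owner s howner).1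
        have hInv2 : pvInv cm (mS.erase owner) (sM.erase s) :=
          pvInv_erase_pair cm mS sM owner s hInv howner
        have hfuel2 : (pvU cm \ pvVisF (vis.add s)).card < fuel :=
          lt_of_lt_of_le (pv_card_lt cm vis s hsU hc) hfuel
        have hine : i ≠ owner := fun h' => by rw [h', howner] at hnone; exact absurd hnone (by simp)
        cases b with
        | true =>
          simp only [Prod.mk.injEq] at h
          obtain ⟨-, hB, hC, hD⟩ := h
          subst hB; subst hC; subst hD
          obtain ⟨hInv2', hiso2, hun2⟩ :=
            ihT cm owner (mS.erase owner) (sM.erase s) (vis.add s) mS2 sM2 vis2 hrec hInv2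
              hownerlen (by rw [pv_get?_erase, if_pos rfl]) hfuel2
          have hmS2i : mS2.get? i = none := by
            cases hmi : mS2.get? i with
            | none => rfl
            | some v =>
              have := (hiso2 i).mp (by rw [hmi]; rfl)
              rcases this with h' | h'
              · exact absurd h' hine
              · rw [pv_get?_erase, if_neg hine, hnone] at h'; exact absurd h' (by simp)
          have hsM2s : sM2.get? s = none := by
            rw [hun2 s ((PySem.Set.mem_add _ _ _).mpr (Or.inr rfl)), pv_get?_erase, if_pos rfl]
          refine ⟨pvInv_insert_pair cm mS2 sM2 i s hInv2' hmS2i hsM2s hlen hadj, ?_, ?_⟩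
          · intro j
            rw [PySem.Dict.get?_insert]
            by_cases hj : j = i
            · rw [if_pos hj]; simp [hj]
            · rw [if_neg hj]
              constructor
              · intro hsome
                rcases (hiso2 j).mp hsome with h' | h'
                · right; rw [h', howner]; rfl
                · rw [pv_get?_erase] at h'
                  split_ifs at h'
                  · exact absurd h' (by simp)
                  · right; exact h'
              · rintro (h' | h')
                · exact absurd h' hj
                · apply (hiso2 j).mpr
                  by_cases hjo : j = owner
                  · left; exact hjo
                  · right; rw [pv_get?_erase, if_neg hjo]; exact h'
          · intro t ht
            have hts : t ≠ s := fun h' => hc (h' ▸ ht)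
            rw [PySem.Dict.get?_insert, if_neg hts,
              hun2 t ((PySem.Set.mem_add _ _ _).mpr (Or.inl ht)), pv_get?_erase, if_neg hts]
        | false =>
          obtain ⟨hm2, hs2, hv2, hslots2, hclo2⟩ :=
            ihF cm owner (mS.erase owner) (sM.erase s) (vis.add s) mS2 sM2 vis2 hrec hInv2
              hownerlen hfuel2
          have hmr : ∀ k, (mS2.insert owner s).get? k = mS.get? k := by
            intro k
            rw [PySem.Dict.get?_insert]
            by_cases hk : k = owner
            · rw [if_pos hk, hk, howner]
            · rw [if_neg hk, hm2 k, pv_get?_erase, if_neg hk]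
          have hsr : ∀ t, (sM2.insert s owner).get? t = sM.get? t := by
            intro t
            rw [PySem.Dict.get?_insert]
            by_cases ht : t = s
            · rw [if_pos ht, ht, hss]
            · rw [if_neg ht, hs2 t, pv_get?_erase, if_neg ht]
          have hInvr : pvInv cm (mS2.insert owner s) (sM2.insert s owner) :=
            pvInv_congr cm _ mS _ sM hmr hsr hInv
          have hvv2 : ∀ t, t ∈ vis → t ∈ vis2 :=
            fun t ht => hv2 t ((PySem.Set.mem_add _ _ _).mpr (Or.inl ht))
          obtain ⟨hInv3, hiso3, hun3⟩ :=
            ih (mS2.insert owner s) (sM2.insert s owner) vis2 mS' sM' vis' h hInvr hlen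
              (by rw [hmr i]; exact hnone)
              (fun u hu => hsub u (List.mem_cons_of_mem _ hu))
              (le_trans (pv_card_mono cm vis vis2 hvv2) hfuel)
          refine ⟨hInv3, ?_, ?_⟩
          · intro j
            rw [hiso3 j, hmr j]
          · intro t ht
            rw [hun3 t (hvv2 t ht), hsr t]

theorem pvAssign_main : ∀ fuel, PvAT fuel ∧ PvAF fuel := by
  intro fuel
  induction fuel with
  | zero =>
    constructor
    · intro cm i mS sM vis mS' sM' vis' h
      rw [pvTryAssign] at h
      exact absurd (congrArg Prod.fst h) (by simp)
    · intro cm i mS sM vis mS' sM' vis' h hInv hlen hfuel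
      exact absurd hfuel (by omega)
  | succ fuel ih =>
    have hLF := pvLF_main fuel ih.2
    have hLT := pvLT_main fuel ih.1 ih.2
    constructor
    · intro cm i mS sM vis mS' sM' vis' h hInv hlen hnone hfuel
      rw [pvTryAssign] at h
      exact hLT cm i (pvSlots cm i) mS sM vis mS' sM' vis' h hInv hlen hnone
        (fun s hs => hs) (by omega)
    · intro cm i mS sM vis mS' sM' vis' h hInv hlen hfuel
      rw [pvTryAssign] at h
      exact hLF cm i (pvSlots cm i) mS sM vis mS' sM' vis' h hInv hlen
        (fun s hs => hs) (by omega)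

theorem pvHall (cm : List (Int × List Int)) (g : Nat → Int) (mS : PySem.Dict Nat Int)
    (sM : PySem.Dict Int Nat) (vis' : PySem.Set Int) (i : Nat)
    (hch : pvChooser cm g) (hInv : pvInv cm mS sM) (hlen : i < cm.length)
    (hnone : mS.get? i = none)
    (hislots : ∀ u ∈ pvSlots cm i, u ∈ vis')
    (hclo : ∀ t ∈ vis', ∃ j, sM.get? t = some j ∧ j < cm.length ∧
      ∀ u ∈ pvSlots cm j, u ∈ vis') :
    False := by
  classical
  obtain ⟨hg, hginj⟩ := hch
  set V : Finset Int := (vis' : List Int).toFinset with hV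
  have hmemV : ∀ t : Int, t ∈ V ↔ t ∈ (vis' : List Int) := fun t => List.mem_toFinset
  set ow : Int → Nat := fun t => (sM.get? t).getD 0 with hOwDef
  have hOw : ∀ t ∈ V, sM.get? t = some (ow t) ∧ ow t < cm.length ∧
      ∀ u ∈ pvSlots cm (ow t), u ∈ V := by
    intro t htV
    obtain ⟨j, hjt, hjlen, hjsl⟩ := hclo t ((hmemV t).mp htV)
    have : ow t = j := by rw [hOwDef]; simp [hjt]
    rw [this]
    exact ⟨hjt, hjlen, fun u hu => (hmemV u).mpr (hjsl u hu)⟩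
  set L : Finset Nat := insert i (V.image ow) with hL
  have hLlen : ∀ j ∈ L, j < cm.length := by
    intro j hj
    rw [hL, Finset.mem_insert] at hj
    rcases hj with rfl | hj
    · exact hlen
    · obtain ⟨t, htV, rfl⟩ := Finset.mem_image.mp hj
      exact (hOw t htV).2.1
  have hgV : ∀ j ∈ L, g j ∈ V := by
    intro j hj
    rw [hL, Finset.mem_insert] at hj
    rcases hj with rfl | hj
    · exact (hmemV _).mpr (hislots _ (hg j hlen))
    · obtain ⟨t, htV, rfl⟩ := Finset.mem_image.mp hj
      exact (hOw t htV).2.2 _ (hg _ (hOw t htV).2.1)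
  have h1 : L.card ≤ V.card :=
    Finset.card_le_card_of_injOn g hgV
      (fun a ha b hb hab => hginj a b (hLlen a ha) (hLlen b hb) hab)
  have howinj : Set.InjOn ow V := by
    intro t1 ht1 t2 ht2 heq
    have h1' := (hOw t1 ht1).1
    have h2' := (hOw t2 ht2).1
    rw [heq] at h1'
    have hm1 := (hInv.1 (ow t2) t1).mpr h1'
    have hm2 := (hInv.1 (ow t2) t2).mpr h2'
    exact Option.some_inj.mp (hm1.symm.trans hm2)
  have h2 : (V.image ow).card = V.card := Finset.card_image_of_injOn howinj
  have h3 : i ∉ V.image ow := by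
    intro hmem
    obtain ⟨t, htV, hti⟩ := Finset.mem_image.mp hmem
    have := (hOw t htV).1
    rw [hti] at this
    have := (hInv.1 i t).mpr this
    rw [hnone] at this
    exact absurd this (by simp)
  have h4 : L.card = V.card + 1 := by rw [hL, Finset.card_insert_of_notMem h3, h2]
  omega

theorem pvInv_empty (cm : List (Int × List Int)) :
    pvInv cm (PySem.Dict.empty : PySem.Dict Nat Int) (PySem.Dict.empty : PySem.Dict Int Nat) := by
  constructor
  · intro j s
    rw [PySem.Dict.get?_empty, PySem.Dict.get?_empty]
    simp
  · intro j s hj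
    rw [PySem.Dict.get?_empty] at hj
    exact absurd hj (by simp)

theorem pv_fuel_start (cm : List (Int × List Int)) :
    (pvU cm \ pvVisF PySem.Set.empty).card < pvFuel cm := by
  have h1 : pvVisF PySem.Set.empty = (∅ : Finset Int) := rfl
  rw [h1, Finset.sdiff_empty]
  have h2 : (pvU cm).card ≤ (cm.flatMap (fun p => p.2)).length := List.toFinset_card_le _
  unfold pvFuel
  omega

theorem pvAll_true : ∀ (cm : List (Int × List Int)) (idxs : List Nat)
    (mS : PySem.Dict Nat Int) (sM : PySem.Dict Int Nat),
    pvAllLoop cm idxs mS sM = true → pvInv cm mS sM →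
    (∀ i ∈ idxs, i < cm.length) → (∀ i ∈ idxs, mS.get? i = none) → idxs.Nodup →
    ∃ mS' sM', pvInv cm mS' sM' ∧
      ∀ j, (j ∈ idxs ∨ (mS.get? j).isSome = true) → (mS'.get? j).isSome = true := by
  intro cm idxs
  induction idxs with
  | nil =>
    intro mS sM h hInv _ _ _
    exact ⟨mS, sM, hInv, fun j hj => by
      rcases hj with h' | h'
      · exact absurd h' (List.not_mem_nil)
      · exact h'⟩
  | cons i rest ih =>
    intro mS sM h hInv hlt hun hnd
    rw [pvAllLoop] at h
    rcases hta : pvTryAssign cm (pvFuel cm) i mS sM PySem.Set.empty with ⟨b, mS1, sM1, vis1⟩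
    rw [hta] at h
    cases b with
    | false => simp at h
    | true =>
      obtain ⟨hInv1, hiso1, -⟩ :=
        (pvAssign_main (pvFuel cm)).1 cm i mS sM PySem.Set.empty mS1 sM1 vis1 hta hInv
          (hlt i List.mem_cons_self) (hun i List.mem_cons_self) (pv_fuel_start cm)
      have hnd' := List.nodup_cons.mp hnd
      obtain ⟨mS', sM', hInv', hcov⟩ :=
        ih mS1 sM1 h hInv1 (fun j hj => hlt j (List.mem_cons_of_mem _ hj))
          (by
            intro j hj
            cases hmj : mS1.get? j with
            | none => rfl
            | some v =>
              rcases (hiso1 j).mp (by rw [hmj]; rfl) with h' | h'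
              · exact absurd (h' ▸ hj) hnd'.1
              · rw [hun j (List.mem_cons_of_mem _ hj)] at h'
                exact absurd h' (by simp))
          hnd'.2
      refine ⟨mS', sM', hInv', fun j hj => ?_⟩
      rcases hj with hj | hj
      · rcases List.mem_cons.mp hj with rfl | hj
        · exact hcov j (Or.inr ((hiso1 j).mpr (Or.inl rfl)))
        · exact hcov j (Or.inl hj)
      · exact hcov j (Or.inr ((hiso1 j).mpr (Or.inr hj)))

theorem pvAll_complete : ∀ (cm : List (Int × List Int)) (g : Nat → Int) (idxs : List Nat)
    (mS : PySem.Dict Nat Int) (sM : PySem.Dict Int Nat),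
    pvChooser cm g → pvInv cm mS sM → (∀ i ∈ idxs, i < cm.length) →
    (∀ i ∈ idxs, mS.get? i = none) → idxs.Nodup → pvAllLoop cm idxs mS sM = true := by
  intro cm g idxs
  induction idxs with
  | nil => intro mS sM _ _ _ _ _; rw [pvAllLoop]
  | cons i rest ih =>
    intro mS sM hch hInv hlt hun hnd
    rw [pvAllLoop]
    rcases hta : pvTryAssign cm (pvFuel cm) i mS sM PySem.Set.empty with ⟨b, mS1, sM1, vis1⟩
    cases b with
    | false =>
      exfalso
      obtain ⟨-, -, -, hsl1, hclo1⟩ :=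
        (pvAssign_main (pvFuel cm)).2 cm i mS sM PySem.Set.empty mS1 sM1 vis1 hta hInv
          (hlt i List.mem_cons_self) (pv_fuel_start cm)
      exact pvHall cm g mS sM vis1 i hch hInv (hlt i List.mem_cons_self)
        (hun i List.mem_cons_self) hsl1
        (fun t ht => hclo1 t ht (List.not_mem_nil))
    | true =>
      obtain ⟨hInv1, hiso1, -⟩ :=
        (pvAssign_main (pvFuel cm)).1 cm i mS sM PySem.Set.empty mS1 sM1 vis1 hta hInv
          (hlt i List.mem_cons_self) (hun i List.mem_cons_self) (pv_fuel_start cm)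
      have hnd' := List.nodup_cons.mp hnd
      exact ih mS1 sM1 hch hInv1 (fun j hj => hlt j (List.mem_cons_of_mem _ hj))
        (by
          intro j hj
          cases hmj : mS1.get? j with
          | none => rfl
          | some v =>
            rcases (hiso1 j).mp (by rw [hmj]; rfl) with h' | h'
            · exact absurd (h' ▸ hj) hnd'.1
            · rw [hun j (List.mem_cons_of_mem _ hj)] at h'
              exact absurd h' (by simp))
        hnd'.2

theorem pvB_char (cm : List (Int × List Int)) :
    has_slot_matching_alt cm = true ↔ ∃ g, pvChooser cm g := by
  unfold has_slot_matching_alt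
  constructor
  · intro h
    obtain ⟨mS', sM', hInv', hcov⟩ :=
      pvAll_true cm (List.range cm.length) PySem.Dict.empty PySem.Dict.empty h
        (pvInv_empty cm) (fun i hi => List.mem_range.mp hi)
        (fun i _ => PySem.Dict.get?_empty _) (List.nodup_range)
    refine ⟨fun k => (mS'.get? k).getD 0, ?_, ?_⟩
    · intro k hk
      have hsome := hcov k (Or.inl (List.mem_range.mpr hk))
      cases hmk : mS'.get? k with
      | none => rw [hmk] at hsome; exact absurd hsome (by simp)
      | some v =>
        dsimp only
        rw [hmk]
        exact (hInv'.2 k v hmk).2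
    · intro k1 k2 h1 h2 heq
      have hs1 := hcov k1 (Or.inl (List.mem_range.mpr h1))
      have hs2 := hcov k2 (Or.inl (List.mem_range.mpr h2))
      cases hm1 : mS'.get? k1 with
      | none => rw [hm1] at hs1; exact absurd hs1 (by simp)
      | some v1 =>
        cases hm2 : mS'.get? k2 with
        | none => rw [hm2] at hs2; exact absurd hs2 (by simp)
        | some v2 =>
          dsimp only at heq
          rw [hm1, hm2] at heq
          simp only [Option.getD_some] at heq
          subst heq
          have e1 := (hInv'.1 k1 v1).mp hm1
          have e2 := (hInv'.1 k2 v1).mp hm2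
          exact Option.some_inj.mp (e1.symm.trans e2)
  · rintro ⟨g, hch⟩
    exact pvAll_complete cm g (List.range cm.length) PySem.Dict.empty PySem.Dict.empty hch
      (pvInv_empty cm) (fun i hi => List.mem_range.mp hi)
      (fun i _ => PySem.Dict.get?_empty _) (List.nodup_range)

-- ===== VERDICT (by name: the statement is the Claim_ definition above) =====
theorem has_slot_matching_spec : Claim_equal_has_slot_matching := by
  intro cm _
  unfold Spec_has_slot_matching
  by_cases h : ∃ g, pvChooser cm g
  · rw [pvA_char cm |>.mpr ((pvSDR_iff_chooser cm).mpr h), (pvB_char cm).mpr h]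
  · cases ha : has_slot_matching cm with
    | true => exact absurd ((pvSDR_iff_chooser cm).mp ((pvA_char cm).mp ha)) h
    | false =>
      cases hb : has_slot_matching_alt cm with
      | true => exact absurd ((pvB_char cm).mp hb) h
      | false => rfl
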